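-- pv_equiv track=rewrite | github.com/AdamOtto/Daily-Challenges | Challenge1188.py | Solution
-- ===== SOURCE A (Python) =====
-- from heapq import heappush, heappop
-- from bisect import bisect, insort
--
-- def Solution(A):
--     N = len(A)
--     if N <= 1:
--         return 0
--
--     sortList = []
--     result = 0
--
--     for i, v in enumerate(A):
--         heappush(sortList, (v, i))
--
--     x = []
--     while sortList:
--         v, i = heappop(sortList)
--         y = bisect(x, i)
--         result += i - y
--         insort(x, i)
--
--     return result
-- ===== SOURCE B (Python) =====
-- def Solution(A):
--     # Count, over the value-sorted traversal, index minus prior smaller-index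
--     # count == the number of inversions of A; computed by merge sort.
--     def rec(xs):
--         n = len(xs)
--         if n <= 1:
--             return xs, 0
--         left, cl = rec(xs[:n // 2])
--         right, cr = rec(xs[n // 2:])
--         inv = cl + cr
--         merged = []
--         i = j = 0
--         while i < len(left) and j < len(right):
--             if left[i] <= right[j]:
--                 merged.append(left[i])
--                 i += 1
--             else:
--                 inv += len(left) - i
--                 merged.append(right[j])
--                 j += 1
--         merged.extend(left[i:])
--         merged.extend(right[j:])
--         return merged, inv
--     return rec(A)[1]
-- ===== Notes on version B (the rewrite author's own statement) =====
-- stated objective: faster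
-- what changed: A pushes every (value, index) pair onto a heap and pops them in sorted order, maintaining a sorted list of seen indices with bisect/insort to accumulate index-minus-prior-smaller-count (the inversion count of A); B computes the same inversion count directly by a recursive merge sort that adds the remaining-left-run length whenever it takes from the right run.
import Mathlib
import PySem

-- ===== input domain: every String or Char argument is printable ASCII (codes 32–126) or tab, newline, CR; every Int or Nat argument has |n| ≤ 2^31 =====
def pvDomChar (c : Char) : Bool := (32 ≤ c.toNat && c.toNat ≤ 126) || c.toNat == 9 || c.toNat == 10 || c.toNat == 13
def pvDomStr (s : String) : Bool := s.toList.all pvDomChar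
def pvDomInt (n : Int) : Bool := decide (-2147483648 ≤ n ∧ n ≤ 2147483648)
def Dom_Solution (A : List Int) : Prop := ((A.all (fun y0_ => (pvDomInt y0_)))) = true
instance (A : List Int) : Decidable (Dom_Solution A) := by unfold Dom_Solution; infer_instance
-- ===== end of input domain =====

-- B replaces A's heap-pop + bisect/insort accumulation (which totals the number of
-- inversions of A) by a merge-sort inversion count; a timing run reports it faster.

-- ===== PORT A =====
-- Python tuple comparison (v, i) < (w, j), lexicographic on Ints.
def pvLex (p q : Int × Int) : Bool := p.1 < q.1 || (p.1 == q.1 && p.2 < q.2)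

-- heappop's contract: the heap hands back its least element.  The heap's internal
-- array layout is not observable in A (only pop order is); we model the heap as the
-- list of its members and heappop as extract-min, which is exact because all pushed
-- pairs are distinct (their second components are distinct indices).
def pvHeapMin (c : Int × Int) : List (Int × Int) → Int × Int
  | [] => c
  | q :: qs => pvHeapMin (if pvLex q c then q else c) qs

theorem pvHeapMin_mem (c : Int × Int) (l : List (Int × Int)) : pvHeapMin c l ∈ c :: l := by
  induction l generalizing c with
  | nil => simp [pvHeapMin]
  | cons q qs ih =>
    simp only [pvHeapMin]
    by_cases h : pvLex q c = true
    · rw [if_pos h]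
      rcases List.mem_cons.mp (ih q) with h1 | h1
      · rw [h1]; simp
      · simp [h1]
    · rw [if_neg h]
      rcases List.mem_cons.mp (ih c) with h1 | h1
      · rw [h1]; simp
      · simp [h1]

-- bisect.insort on the sorted list x: insert i after all elements ≤ i (exact).
def pvInsort (x : List Int) (i : Int) : List Int :=
  match x with
  | [] => [i]
  | j :: js => if i < j then i :: j :: js else j :: pvInsort js i

-- the 'while sortList:' loop of A: pop the least pair, bisect (PySem.List.bisectRight),
-- accumulate, insort.
def pvPopLoop : List (Int × Int) → List Int → Int → Int
  | [], _, r => r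
  | p :: ps, x, r =>
    let m := pvHeapMin p ps
    let y : Int := PySem.List.bisectRight x m.2
    pvPopLoop ((p :: ps).erase m) (pvInsort x m.2) (r + m.2 - y)
termination_by s _ _ => s.length
decreasing_by
  have hm := pvHeapMin_mem p ps
  have := List.length_erase_of_mem hm
  simp_all

def Solution (A : List Int) : Int :=
  let N : Int := A.length
  if N ≤ 1 then 0
  else
    -- the heappush loop: push (v, i) for i, v in enumerate(A)
    let sortList := (PySem.List.enumerate A).foldl (fun h iv => h ++ [(iv.2, iv.1)]) []
    pvPopLoop sortList [] 0

-- ===== PORT B =====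
-- the merge loop of Source B: one recursive step per while-iteration / trailing extend.
def pvMerge : List Int → List Int → List Int × Int
  | [], r => (r, 0)
  | a :: l, [] => (a :: l, 0)
  | a :: l, b :: r =>
    if a ≤ b then
      let res := pvMerge l (b :: r)
      (a :: res.1, res.2)
    else
      let res := pvMerge (a :: l) r
      (b :: res.1, res.2 + ((a :: l).length : Int))
termination_by l r => l.length + r.length

-- rec(xs) of Source B: (sorted xs, inversion count of xs)
def pvMSort (xs : List Int) : List Int × Int :=
  if xs.length ≤ 1 then (xs, 0)
  else
    let n := xs.length
    let resL := pvMSort (xs.take (n / 2))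
    let resR := pvMSort (xs.drop (n / 2))
    let m := pvMerge resL.1 resR.1
    (m.1, resL.2 + resR.2 + m.2)
termination_by xs.length
decreasing_by
  · simp; omega
  · simp; omega

def Solution_alt (A : List Int) : Int := (pvMSort A).2

-- ===== PRECONDITION & SPEC =====
def Spec_Solution (A : List Int) (out : Int) : Prop := out = Solution_alt A
instance (A : List Int) (out : Int) : Decidable (Spec_Solution A out) := by unfold Spec_Solution; infer_instance

-- ===== CLAIM (what is proved, stated in full; the proofs are below) =====
def Claim_equal_Solution : Prop := ∀ (A : List Int), Dom_Solution A → Spec_Solution A (Solution A)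

-- ===== LEMMAS AND PROOFS =====

-- ---- generic counting helpers ----
theorem countP_add_not {α : Type} (l : List α) (p : α → Bool) :
    l.countP p + l.countP (fun a => !(p a)) = l.length := by
  induction l with
  | nil => simp
  | cons a l ih => by_cases h : p a <;> simp [List.countP_cons, h] <;> omega

-- ---- pvLex order facts ----
theorem pvLex_iff (p q : Int × Int) :
    pvLex p q = true ↔ (p.1 < q.1 ∨ (p.1 = q.1 ∧ p.2 < q.2)) := by
  simp [pvLex]

theorem pvLex_irrefl (p : Int × Int) : pvLex p p = false := by
  simp [pvLex]

theorem pvLex_trans {p q r : Int × Int} (h1 : pvLex p q = true) (h2 : pvLex q r = true) :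
    pvLex p r = true := by
  rw [pvLex_iff] at *
  omega

theorem pvLex_total {p q : Int × Int} (h : p.2 ≠ q.2) :
    pvLex p q = true ∨ pvLex q p = true := by
  rw [pvLex_iff, pvLex_iff]
  omega

theorem pvLex_neg {a c : Int × Int} (h : ¬ pvLex a c = true) : pvLex c a = true ∨ a = c := by
  rw [pvLex_iff] at *
  rcases a with ⟨a1, a2⟩
  rcases c with ⟨c1, c2⟩
  simp only [Prod.mk.injEq]
  simp only [not_or, not_and, not_lt] at h
  omega

theorem pvHeapMin_min (l : List (Int × Int)) (c : Int × Int) :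
    ∀ q ∈ c :: l, pvLex q (pvHeapMin c l) = false := by
  induction l generalizing c with
  | nil =>
    intro q hq; simp at hq; subst hq; exact pvLex_irrefl q
  | cons a l ih =>
    intro q hq
    by_cases hac : pvLex a c = true
    · have hrec : pvHeapMin c (a :: l) = pvHeapMin a l := by simp [pvHeapMin, hac]
      rw [hrec]
      rcases List.mem_cons.mp hq with rfl | hq1
      · by_contra hcm
        replace hcm : pvLex q (pvHeapMin a l) = true := by simpa using hcm
        have h2 := pvLex_trans hac hcm
        have h3 := ih a a List.mem_cons_self
        simp [h3] at h2
      · exact ih a q hq1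
    · have hrec : pvHeapMin c (a :: l) = pvHeapMin c l := by simp [pvHeapMin, hac]
      rw [hrec]
      rcases List.mem_cons.mp hq with rfl | hq1
      · exact ih q q List.mem_cons_self
      · rcases List.mem_cons.mp hq1 with rfl | hq2
        · by_contra ham
          replace ham : pvLex q (pvHeapMin c l) = true := by simpa using ham
          have h3 := ih c c List.mem_cons_self
          rcases pvLex_neg hac with h | h
          · have h2 := pvLex_trans h ham
            simp [h3] at h2
          · rw [h] at ham
            simp [h3] at ham
        · exact ih _ q (List.mem_cons_of_mem _ hq2)

theorem pvInsort_perm (x : List Int) (i : Int) : (pvInsort x i).Perm (i :: x) := by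
  induction x with
  | nil => simp [pvInsort]
  | cons j js ih =>
    simp only [pvInsort]
    split
    · exact List.Perm.refl _
    · exact (ih.cons j).trans (List.Perm.swap i j js)

theorem pvInsort_sorted {x : List Int} (hx : x.Pairwise (· ≤ ·)) (i : Int) :
    (pvInsort x i).Pairwise (· ≤ ·) := by
  induction x with
  | nil => simp [pvInsort]
  | cons j js ih =>
    rcases List.pairwise_cons.mp hx with ⟨hj, hjs⟩
    simp only [pvInsort]
    by_cases h : i < j
    · rw [if_pos h]
      refine List.pairwise_cons.mpr ⟨?_, hx⟩
      intro b hb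
      rcases List.mem_cons.mp hb with rfl | hbb
      · omega
      · have := hj b hbb; omega
    · rw [if_neg h]
      refine List.pairwise_cons.mpr ⟨?_, ih hjs⟩
      intro b hb
      have hb2 : b ∈ i :: js := (pvInsort_perm js i).mem_iff.mp hb
      rcases List.mem_cons.mp hb2 with rfl | hbb
      · omega
      · exact hj b hbb

-- ---- bisect on a sorted list counts the elements ≤ i ----
theorem bisectRight_eq_countP {x : List Int} (hx : x.Pairwise (· ≤ ·)) (i : Int) :
    PySem.List.bisectRight x i = x.countP (fun j => decide (j ≤ i)) := by
  obtain ⟨hle, hlt, hgt⟩ := PySem.List.bisectRight_spec x i hx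
  set br := PySem.List.bisectRight x i with hbr
  have h1 : (x.take br).countP (fun j => decide (j ≤ i)) = (x.take br).length := by
    rw [List.countP_eq_length]
    intro a ha
    rcases List.mem_iff_getElem.mp ha with ⟨k, hk, hak⟩
    have hk' : k < x.length := by
      have : (List.take br x).length = min br x.length := List.length_take; omega
    have : (x.take br)[k] = x[k] := List.getElem_take
    have hkbr : k < br := by
      have : (List.take br x).length = min br x.length := List.length_take; omega
    simpa [← hak, this] using hlt k hk' hkbr
  have h2 : (x.drop br).countP (fun j => decide (j ≤ i)) = 0 := by
    rw [List.countP_eq_zero]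
    intro a ha
    rcases List.mem_iff_getElem.mp ha with ⟨k, hk, hak⟩
    have hk' : br + k < x.length := by
      have : (List.drop br x).length = x.length - br := List.length_drop; omega
    have : (x.drop br)[k] = x[br + k] := List.getElem_drop
    have := hgt (br + k) hk' (by omega)
    simp [← hak, List.getElem_drop]
    omega
  have := List.take_append_drop br x
  calc br = (x.take br).length := by
            rw [List.length_take]; omega
    _ = (x.take br).countP (fun j => decide (j ≤ i)) := h1.symm
    _ = x.countP (fun j => decide (j ≤ i)) := by
          conv_rhs => rw [← List.take_append_drop br x]
          rw [List.countP_append, h2]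
          omega

-- ---- the value of the pop loop as a sum over the remaining pairs ----
def pvCntLE (x : List Int) (i : Int) : Int := (x.countP (fun j => decide (j ≤ i)) : Int)

def pvTermC (full : List (Int × Int)) (x : List Int) (p : Int × Int) : Int :=
  p.2 - pvCntLE x p.2 - (full.countP (fun q => pvLex q p && decide (q.2 < p.2)) : Int)

def pvTermSum (S full : List (Int × Int)) (x : List Int) : Int := (S.map (pvTermC full x)).sum

theorem pvTermC_step {m p : Int × Int} {rest : List (Int × Int)} {x : List Int}
    (hlex : pvLex m p = true) (hne : m.2 ≠ p.2) :
    pvTermC (m :: rest) x p = pvTermC rest (pvInsort x m.2) p := by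
  unfold pvTermC pvCntLE
  rw [List.countP_cons, (pvInsort_perm x m.2).countP_eq, List.countP_cons]
  by_cases h : m.2 < p.2
  · have h1 : (pvLex m p && decide (m.2 < p.2)) = true := by simp [hlex, h]
    have h2 : decide (m.2 ≤ p.2) = true := by simp; omega
    rw [h1, h2]
    push_cast
    ring
  · have h1 : (pvLex m p && decide (m.2 < p.2)) = false := by simp [h]
    have h2 : decide (m.2 ≤ p.2) = false := by simp; omega
    rw [h1, h2]
    push_cast
    ring

theorem pvTermC_min {m : Int × Int} {rest : List (Int × Int)} {x : List Int}
    (hmin : ∀ q ∈ m :: rest, pvLex q m = false) :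
    pvTermC (m :: rest) x m = m.2 - pvCntLE x m.2 := by
  unfold pvTermC
  have h0 : (m :: rest).countP (fun q => pvLex q m && decide (q.2 < m.2)) = 0 := by
    rw [List.countP_eq_zero]
    intro q hq
    simp [hmin q hq]
  rw [h0]
  push_cast
  ring

theorem pvPopLoop_eq : ∀ (n : Nat) (S : List (Int × Int)) (x : List Int) (r : Int),
    S.length = n → (S.map Prod.snd).Nodup → x.Pairwise (· ≤ ·) →
    pvPopLoop S x r = r + pvTermSum S S x := by
  intro n
  induction n with
  | zero =>
    intro S x r hlen hnd hx
    have : S = [] := List.eq_nil_of_length_eq_zero hlen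
    subst this
    simp [pvPopLoop, pvTermSum]
  | succ n ih =>
    intro S x r hlen hnd hx
    obtain ⟨p, ps, rfl⟩ : ∃ p ps, S = p :: ps := by
      cases S with
      | nil => simp at hlen
      | cons p ps => exact ⟨p, ps, rfl⟩
    have hmem : pvHeapMin p ps ∈ p :: ps := pvHeapMin_mem p ps
    have hperm : (p :: ps).Perm (pvHeapMin p ps :: (p :: ps).erase (pvHeapMin p ps)) :=
      List.perm_cons_erase hmem
    have hpermsnd : ((p :: ps).map Prod.snd).Perm
        ((pvHeapMin p ps :: (p :: ps).erase (pvHeapMin p ps)).map Prod.snd) := hperm.map _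
    have hnd2 : ((pvHeapMin p ps :: (p :: ps).erase (pvHeapMin p ps)).map Prod.snd).Nodup :=
      (hpermsnd.nodup_iff).mp hnd
    have hndrest : (((p :: ps).erase (pvHeapMin p ps)).map Prod.snd).Nodup :=
      (List.nodup_cons.mp hnd2).2
    have hnotin : (pvHeapMin p ps).2 ∉ ((p :: ps).erase (pvHeapMin p ps)).map Prod.snd :=
      (List.nodup_cons.mp hnd2).1
    have hlenrest : ((p :: ps).erase (pvHeapMin p ps)).length = n := by
      have h1 := List.length_erase_of_mem hmem
      rw [h1]
      simp only [List.length_cons] at hlen ⊢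
      omega
    have hx2 : (pvInsort x (pvHeapMin p ps).2).Pairwise (· ≤ ·) := pvInsort_sorted hx _
    have hbi : (PySem.List.bisectRight x (pvHeapMin p ps).2 : Int) = pvCntLE x (pvHeapMin p ps).2 := by
      rw [bisectRight_eq_countP hx]; rfl
    have hmin : ∀ q ∈ p :: ps, pvLex q (pvHeapMin p ps) = false := pvHeapMin_min ps p
    have hleast : ∀ q ∈ (p :: ps).erase (pvHeapMin p ps), pvLex (pvHeapMin p ps) q = true := by
      intro q hq
      have hqS : q ∈ p :: ps := (List.erase_sublist).mem hq
      have hqsnd : q.2 ∈ ((p :: ps).erase (pvHeapMin p ps)).map Prod.snd :=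
        List.mem_map_of_mem hq
      have hne : q ≠ pvHeapMin p ps := by
        intro hqe
        exact hnotin (hqe ▸ hqsnd)
      have hsnd : q.2 ≠ (pvHeapMin p ps).2 := by
        intro hqe
        exact hnotin (hqe ▸ hqsnd)
      rcases pvLex_total hsnd with h | h
      · have := hmin q hqS
        simp_all
      · exact h
    -- evaluate one loop step
    rw [pvPopLoop]
    rw [ih _ _ _ hlenrest hndrest hx2, hbi]
    -- now identify the sums
    have hsum1 : pvTermSum (p :: ps) (p :: ps) x =
        pvTermSum (pvHeapMin p ps :: (p :: ps).erase (pvHeapMin p ps))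
          (pvHeapMin p ps :: (p :: ps).erase (pvHeapMin p ps)) x := by
      unfold pvTermSum
      have hfun : (p :: ps).map (pvTermC (p :: ps) x) =
          (p :: ps).map (pvTermC (pvHeapMin p ps :: (p :: ps).erase (pvHeapMin p ps)) x) := by
        apply List.map_congr_left
        intro a _
        unfold pvTermC
        rw [hperm.countP_eq]
      rw [hfun]
      exact (hperm.map _).sum_eq
    have hsum2 : pvTermSum ((p :: ps).erase (pvHeapMin p ps))
        (pvHeapMin p ps :: (p :: ps).erase (pvHeapMin p ps)) x =
        pvTermSum ((p :: ps).erase (pvHeapMin p ps)) ((p :: ps).erase (pvHeapMin p ps))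
          (pvInsort x (pvHeapMin p ps).2) := by
      unfold pvTermSum
      congr 1
      apply List.map_congr_left
      intro q hq
      have hsnd : (pvHeapMin p ps).2 ≠ q.2 := by
        intro hqe
        exact hnotin (hqe ▸ List.mem_map_of_mem hq)
      exact pvTermC_step (hleast q hq) hsnd
    have hmin2 : ∀ q ∈ pvHeapMin p ps :: (p :: ps).erase (pvHeapMin p ps),
        pvLex q (pvHeapMin p ps) = false := by
      intro q hq
      exact hmin q (hperm.mem_iff.mpr hq)
    rw [hsum1]
    unfold pvTermSum
    rw [List.map_cons, List.sum_cons]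
    rw [pvTermC_min hmin2]
    have := hsum2
    unfold pvTermSum at this
    rw [← this]
    ring

-- ---- the pair list (A[i], i) and the sum it produces ----
def pairsFrom (k : Int) : List Int → List (Int × Int)
  | [] => []
  | v :: vs => (v, k) :: pairsFrom (k + 1) vs

def pvJ : List Int → List Int → Int
  | [], _ => 0
  | v :: vs, prev => (prev.countP (fun w => decide (v < w)) : Int) + pvJ vs (prev ++ [v])

def invCount : List Int → Int
  | [] => 0
  | x :: t => (t.countP (fun a => decide (a < x)) : Int) + invCount t

def crossI (u v : List Int) : Int :=
  (v.map (fun b => (u.countP (fun a => decide (b < a)) : Int))).sum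

theorem pairsFrom_append : ∀ (u v : List Int) (k : Int),
    pairsFrom k (u ++ v) = pairsFrom k u ++ pairsFrom (k + u.length) v := by
  intro u
  induction u with
  | nil => intro v k; simp [pairsFrom]
  | cons x u' ih =>
    intro v k
    simp only [List.cons_append, pairsFrom, ih, List.length_cons, List.cons_append]
    congr 2
    push_cast
    ring

theorem pairsFrom_snd_lb : ∀ (xs : List Int) (k : Int) (q : Int × Int),
    q ∈ pairsFrom k xs → k ≤ q.2 ∧ q.2 < k + xs.length := by
  intro xs
  induction xs with
  | nil => intro k q hq; simp [pairsFrom] at hq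
  | cons v vs ih =>
    intro k q hq
    simp only [pairsFrom, List.mem_cons] at hq
    rcases hq with rfl | hq
    · simp only [List.length_cons]
      push_cast
      omega
    · have := ih (k + 1) q hq
      simp only [List.length_cons]
      push_cast at this ⊢
      omega

theorem countP_pairsFrom : ∀ (xs : List Int) (k : Int) (P : Int × Int → Bool) (Q : Int → Bool),
    (∀ (v : Int) (j : Int), k ≤ j → j < k + xs.length → P (v, j) = Q v) →
    (pairsFrom k xs).countP P = xs.countP Q := by
  intro xs
  induction xs with
  | nil => intro k P Q h; simp [pairsFrom]
  | cons v vs ih =>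
    intro k P Q h
    simp only [pairsFrom, List.countP_cons]
    have h1 : P (v, k) = Q v := by
      apply h v k le_rfl
      simp only [List.length_cons]
      push_cast
      omega
    have h2 : (pairsFrom (k + 1) vs).countP P = vs.countP Q := by
      apply ih
      intro w j hj1 hj2
      apply h w j (by omega)
      simp only [List.length_cons]
      push_cast at hj2 ⊢
      omega
    rw [h1, h2]

theorem pairsFrom_snd_nodup : ∀ (xs : List Int) (k : Int),
    ((pairsFrom k xs).map Prod.snd).Nodup := by
  intro xs
  induction xs with
  | nil => intro k; simp [pairsFrom]
  | cons v vs ih =>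
    intro k
    simp only [pairsFrom, List.map_cons]
    refine List.nodup_cons.mpr ⟨?_, ih (k + 1)⟩
    intro hk
    rcases List.mem_map.mp hk with ⟨q, hq, hq2⟩
    have := pairsFrom_snd_lb vs (k + 1) q hq
    omega

theorem foldl_append_eq_map : ∀ (l : List (Int × Int)) (init : List (Int × Int)),
    l.foldl (fun h iv => h ++ [(iv.2, iv.1)]) init = init ++ l.map (fun iv => (iv.2, iv.1)) := by
  intro l
  induction l with
  | nil => intro init; simp
  | cons a l ih => intro init; simp [ih]

theorem enum_swap_eq_pairsFrom : ∀ (xs : List Int) (k : Int),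
    (PySem.List.enumerate xs k).map (fun iv => (iv.2, iv.1)) = pairsFrom k xs := by
  intro xs
  induction xs with
  | nil => intro k; simp [PySem.List.enumerate_nil, pairsFrom]
  | cons v vs ih => intro k; rw [PySem.List.enumerate_cons]; simp [pairsFrom, ih]

-- the total of the pop loop, summed in the original index order
theorem pvTermSum_pairs : ∀ (rest prev : List Int),
    pvTermSum (pairsFrom (prev.length : Int) rest) (pairsFrom 0 (prev ++ rest)) [] =
      pvJ rest prev := by
  intro rest
  induction rest with
  | nil => intro prev; simp [pvTermSum, pairsFrom, pvJ]
  | cons v vs ih =>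
    intro prev
    simp only [pairsFrom, pvTermSum, List.map_cons, List.sum_cons]
    have hhead : pvTermC (pairsFrom 0 (prev ++ v :: vs)) [] (v, (prev.length : Int)) =
        (prev.countP (fun w => decide (v < w)) : Int) := by
      unfold pvTermC pvCntLE
      rw [pairsFrom_append prev (v :: vs) 0]
      rw [List.countP_append]
      have hz : (pairsFrom (0 + (prev.length : Int)) (v :: vs)).countP
          (fun q => pvLex q (v, (prev.length : Int)) && decide (q.2 < (prev.length : Int))) = 0 := by
        rw [List.countP_eq_zero]
        intro q hq
        have := pairsFrom_snd_lb (v :: vs) _ q hq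
        have : decide (q.2 < (prev.length : Int)) = false := by
          simp only [decide_eq_false_iff_not, not_lt]
          omega
        simp [this]
      have hone : (pairsFrom 0 prev).countP
          (fun q => pvLex q (v, (prev.length : Int)) && decide (q.2 < (prev.length : Int))) =
          prev.countP (fun w => decide (w ≤ v)) := by
        apply countP_pairsFrom
        intro w j hj1 hj2
        have hj : j < (prev.length : Int) := by omega
        have hjd : decide (j < (prev.length : Int)) = true := by simpa using hj
        rw [Bool.eq_iff_iff]
        simp [pvLex, hjd]
        omega
      rw [hz, hone]
      have hsplit := countP_add_not prev (fun w => decide (w ≤ v))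
      have hcong : prev.countP (fun w => !(decide (w ≤ v))) =
          prev.countP (fun w => decide (v < w)) := by
        apply List.countP_congr
        intro a _
        rw [Bool.eq_iff_iff]
        simp
      rw [hcong] at hsplit
      simp only [List.countP_nil]
      push_cast
      omega
    have htail : pvTermSum (pairsFrom ((prev.length : Int) + 1) vs)
        (pairsFrom 0 (prev ++ v :: vs)) [] = pvJ vs (prev ++ [v]) := by
      have h1 : prev ++ v :: vs = (prev ++ [v]) ++ vs := by simp
      have h2 : ((prev ++ [v]).length : Int) = (prev.length : Int) + 1 := by
        simp
      rw [h1, ← h2, ih (prev ++ [v])]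
    unfold pvTermSum at htail
    rw [htail, hhead]
    rfl

-- ---- pvJ, invCount, crossI ----
theorem crossI_nil (v : List Int) : crossI [] v = 0 := by
  unfold crossI
  induction v with
  | nil => simp
  | cons b v ih => simpa using ih

theorem crossI_cons_right (u : List Int) (b : Int) (v : List Int) :
    crossI u (b :: v) = (u.countP (fun a => decide (b < a)) : Int) + crossI u v := by
  simp [crossI]

theorem crossI_cons_left (x : Int) (u v : List Int) :
    crossI (x :: u) v = (v.countP (fun b => decide (b < x)) : Int) + crossI u v := by
  unfold crossI
  have h : ∀ b : Int, ((x :: u).countP (fun a => decide (b < a)) : Int) =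
      (if decide (b < x) = true then (1 : Int) else 0) + (u.countP (fun a => decide (b < a)) : Int) := by
    intro b
    rw [List.countP_cons]
    by_cases hb : b < x <;> simp [hb] <;> omega
  calc (v.map (fun b => ((x :: u).countP (fun a => decide (b < a)) : Int))).sum
      = (v.map (fun b => (if decide (b < x) = true then (1 : Int) else 0) +
          (u.countP (fun a => decide (b < a)) : Int))).sum := by
        congr 1
        exact List.map_congr_left (fun b _ => h b)
    _ = (v.map (fun b => if decide (b < x) = true then (1 : Int) else 0)).sum +
        (v.map (fun b => (u.countP (fun a => decide (b < a)) : Int))).sum :=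
        PySem.List.sum_map_add_int v _ _
    _ = (v.countP (fun b => decide (b < x)) : Int) +
        (v.map (fun b => (u.countP (fun a => decide (b < a)) : Int))).sum := by
        rw [PySem.List.sum_map_ite_one_zero]

theorem crossI_perm_left {u u' : List Int} (h : u.Perm u') (v : List Int) :
    crossI u v = crossI u' v := by
  unfold crossI
  congr 1
  apply List.map_congr_left
  intro b _
  rw [h.countP_eq]

theorem crossI_perm_right {v v' : List Int} (u : List Int) (h : v.Perm v') :
    crossI u v = crossI u v' := by
  unfold crossI
  exact (h.map _).sum_eq

theorem pvJ_eq : ∀ (xs prev : List Int), pvJ xs prev = crossI prev xs + invCount xs := by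
  intro xs
  induction xs with
  | nil => intro prev; simp [pvJ, invCount, crossI]
  | cons v vs ih =>
    intro prev
    simp only [pvJ, invCount, ih (prev ++ [v]), crossI_cons_right]
    have h : crossI (prev ++ [v]) vs = crossI prev vs + (vs.countP (fun b => decide (b < v)) : Int) := by
      have hp : (prev ++ [v]).Perm (v :: prev) := by
        simpa using (List.perm_append_comm (l₁ := prev) (l₂ := [v]))
      rw [crossI_perm_left hp, crossI_cons_left]
      ring
    rw [h]
    have hc : prev.countP (fun w => decide (v < w)) = prev.countP (fun a => decide (v < a)) := rfl
    rw [hc]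
    ring

theorem invCount_append : ∀ (u v : List Int),
    invCount (u ++ v) = invCount u + invCount v + crossI u v := by
  intro u
  induction u with
  | nil => intro v; simp [invCount, crossI_nil]
  | cons x u' ih =>
    intro v
    simp only [List.cons_append, invCount, List.countP_append, ih, crossI_cons_left]
    push_cast
    ring

-- ---- merge sort counts the inversions ----
theorem pvMerge_perm : ∀ (l r : List Int), (pvMerge l r).1.Perm (l ++ r) := by
  intro l r
  induction l, r using pvMerge.induct with
  | case1 r => simp [pvMerge]
  | case2 a l => simp [pvMerge]
  | case3 a l b r hab ih =>
    simp only [pvMerge, if_pos hab]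
    exact ih.cons a
  | case4 a l b r hab ih =>
    simp only [pvMerge, if_neg hab]
    refine (ih.cons b).trans ?_
    exact (List.perm_middle).symm

theorem pvMerge_sorted : ∀ (l r : List Int), l.Pairwise (· ≤ ·) → r.Pairwise (· ≤ ·) →
    (pvMerge l r).1.Pairwise (· ≤ ·) := by
  intro l r
  induction l, r using pvMerge.induct with
  | case1 r => intro _ hr; simpa [pvMerge] using hr
  | case2 a l => intro hl _; simpa [pvMerge] using hl
  | case3 a l b r hab ih =>
    intro hl hr
    rcases List.pairwise_cons.mp hl with ⟨ha, hl'⟩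
    simp only [pvMerge, if_pos hab]
    refine List.pairwise_cons.mpr ⟨?_, ih hl' hr⟩
    intro c hc
    have : c ∈ l ++ b :: r := (pvMerge_perm l (b :: r)).mem_iff.mp hc
    rcases List.mem_append.mp this with h | h
    · exact ha c h
    · rcases List.mem_cons.mp h with rfl | h'
      · exact hab
      · rcases List.pairwise_cons.mp hr with ⟨hb, _⟩
        exact hab.trans (hb c h')
  | case4 a l b r hab ih =>
    intro hl hr
    rcases List.pairwise_cons.mp hr with ⟨hb, hr'⟩
    simp only [pvMerge, if_neg hab]
    refine List.pairwise_cons.mpr ⟨?_, ih hl hr'⟩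
    intro c hc
    have : c ∈ (a :: l) ++ r := (pvMerge_perm (a :: l) r).mem_iff.mp hc
    rcases List.mem_append.mp this with h | h
    · rcases List.mem_cons.mp h with rfl | h'
      · omega
      · rcases List.pairwise_cons.mp hl with ⟨ha, _⟩
        have := ha c h'
        omega
    · exact hb c h

theorem pvMerge_count : ∀ (l r : List Int), l.Pairwise (· ≤ ·) → r.Pairwise (· ≤ ·) →
    (pvMerge l r).2 = crossI l r := by
  intro l r
  induction l, r using pvMerge.induct with
  | case1 r => intro _ _; simp [pvMerge, crossI_nil]
  | case2 a l => intro _ _; simp [pvMerge, crossI]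
  | case3 a l b r hab ih =>
    intro hl hr
    rcases List.pairwise_cons.mp hl with ⟨ha, hl'⟩
    simp only [pvMerge, if_pos hab]
    rw [ih hl' hr]
    -- crossI (a :: l) (b :: r) = crossI l (b :: r): a exceeds no element of b :: r
    rw [crossI_cons_left]
    have h0 : (b :: r).countP (fun c => decide (c < a)) = 0 := by
      rw [List.countP_eq_zero]
      intro c hc
      rcases List.mem_cons.mp hc with rfl | h'
      · simp; omega
      · rcases List.pairwise_cons.mp hr with ⟨hb, _⟩
        have := hb c h'
        simp; omega
    rw [h0]
    simp
  | case4 a l b r hab ih =>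
    intro hl hr
    rcases List.pairwise_cons.mp hr with ⟨hb, hr'⟩
    simp only [pvMerge, if_neg hab]
    rw [ih hl hr']
    rw [crossI_cons_right]
    have hfull : (a :: l).countP (fun c => decide (b < c)) = (a :: l).length := by
      rw [List.countP_eq_length]
      intro c hc
      rcases List.mem_cons.mp hc with rfl | h'
      · simp; omega
      · rcases List.pairwise_cons.mp hl with ⟨ha, _⟩
        have := ha c h'
        simp; omega
    rw [hfull]
    ring

theorem pvMSort_spec_aux : ∀ (n : Nat) (xs : List Int), xs.length ≤ n →
    (pvMSort xs).1.Perm xs ∧ (pvMSort xs).1.Pairwise (· ≤ ·) ∧ (pvMSort xs).2 = invCount xs := by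
  intro n
  induction n with
  | zero =>
    intro xs hn
    have h1 : xs.length ≤ 1 := by omega
    rw [pvMSort, if_pos h1]
    have : xs = [] := List.eq_nil_of_length_eq_zero (by omega)
    subst this
    exact ⟨List.Perm.refl _, by simp, by simp [invCount]⟩
  | succ n ih =>
    intro xs hn
    by_cases h1 : xs.length ≤ 1
    · rw [pvMSort, if_pos h1]
      match xs, h1 with
      | [], _ => exact ⟨List.Perm.refl _, by simp, by simp [invCount]⟩
      | [x], _ => exact ⟨List.Perm.refl _, by simp, by simp [invCount]⟩
    · rw [pvMSort, if_neg h1]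
      simp only
      have htl : (xs.take (xs.length / 2)).length ≤ n := by
        rw [List.length_take]
        omega
      have hdl : (xs.drop (xs.length / 2)).length ≤ n := by
        rw [List.length_drop]
        omega
      obtain ⟨hLp, hLs, hLc⟩ := ih (xs.take (xs.length / 2)) htl
      obtain ⟨hRp, hRs, hRc⟩ := ih (xs.drop (xs.length / 2)) hdl
      set L := (pvMSort (xs.take (xs.length / 2))).1 with hL
      set R := (pvMSort (xs.drop (xs.length / 2))).1 with hR
      have hperm : (pvMerge L R).1.Perm xs := by
        refine (pvMerge_perm L R).trans ?_
        refine (hLp.append hRp).trans ?_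
        rw [List.take_append_drop]
      refine ⟨hperm, pvMerge_sorted L R hLs hRs, ?_⟩
      rw [pvMerge_count L R hLs hRs, hLc, hRc]
      have hcross : crossI L R = crossI (xs.take (xs.length / 2)) (xs.drop (xs.length / 2)) := by
        rw [crossI_perm_left hLp, crossI_perm_right _ hRp]
      rw [hcross]
      conv_rhs => rw [← List.take_append_drop (xs.length / 2) xs]
      rw [invCount_append]

theorem pvMSort_count (xs : List Int) : (pvMSort xs).2 = invCount xs :=
  (pvMSort_spec_aux xs.length xs le_rfl).2.2

-- ---- assembling both sides ----
theorem pvJ_nil_eq_inv (xs : List Int) : pvJ xs [] = invCount xs := by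
  rw [pvJ_eq, crossI_nil]
  ring

theorem Solution_eq_inv (A : List Int) : Solution A = invCount A := by
  unfold Solution
  by_cases h : ((A.length : Int)) ≤ 1
  · rw [if_pos h]
    match A, h with
    | [], _ => simp [invCount]
    | [x], _ => simp [invCount]
    | a :: b :: t, h => simp at h; omega
  · rw [if_neg h]
    rw [foldl_append_eq_map, enum_swap_eq_pairsFrom]
    simp only [List.nil_append]
    rw [pvPopLoop_eq (pairsFrom 0 A).length (pairsFrom 0 A) [] 0 rfl
        (pairsFrom_snd_nodup A 0) (by simp)]
    have hsum := pvTermSum_pairs A []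
    simp only [List.length_nil, Nat.cast_zero, List.nil_append] at hsum
    rw [hsum, pvJ_nil_eq_inv]
    ring

-- ===== VERDICT (by name: the statement is the Claim_ definition above) =====
theorem Solution_spec : Claim_equal_Solution := by
  intro A _
  unfold Spec_Solution Solution_alt
  rw [pvMSort_count, Solution_eq_inv]
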